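-- pv_equiv track=rewrite | github.com/Adversarian/PSO-2DBP | utils/pso.py | place_box_in_bin
-- ===== SOURCE A (Python) =====
-- def place_box_in_bin(bin, w, h, bin_width, bin_height):
--     for x in range(bin_width - w + 1):
--         for y in range(bin_height - h + 1):
--             if all(
--                 x + w <= bin_x
--                 or x >= bin_x + bin_w
--                 or y + h <= bin_y
--                 or y >= bin_y + bin_h
--                 for bin_x, bin_y, bin_w, bin_h in bin
--             ):
--                 bin.append((x, y, w, h))
--                 return True
--     return False
-- ===== SOURCE B (Python) =====
-- def place_box_in_bin(bin, w, h, bin_width, bin_height):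
--     # Only x-coordinates 0 or a box's right edge, and y-coordinates 0 or a box's
--     # top edge, can be the lexicographically first free position: any free spot
--     # can be slid left/down until it touches such an edge (or 0).
--     xs = sorted({0} | {bx + bw for bx, by, bw, bh in bin})
--     ys = sorted({0} | {by + bh for bx, by, bw, bh in bin})
--     for x in xs:
--         if x < 0 or x > bin_width - w:
--             continue
--         for y in ys:
--             if y < 0 or y > bin_height - h:
--                 continue
--             if all(x + w <= bx or x >= bx + bw or y + h <= by or y >= by + bh
--                    for bx, by, bw, bh in bin):
--                 bin.append((x, y, w, h))
--                 return True
--     return False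
-- ===== Notes on version B (the rewrite author's own statement) =====
-- stated objective: alternative
-- what changed: Instead of scanning every grid cell, B only tests candidate x-coordinates (0 or a placed box's right edge) and candidate y-coordinates (0 or a box's top edge), sorted ascending: any free position can be slid left/down to such a breakpoint, so B finds the same lexicographically first free position (same value and same appended box) while its work depends on the number of boxes, not the bin dimensions.
import Mathlib
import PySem

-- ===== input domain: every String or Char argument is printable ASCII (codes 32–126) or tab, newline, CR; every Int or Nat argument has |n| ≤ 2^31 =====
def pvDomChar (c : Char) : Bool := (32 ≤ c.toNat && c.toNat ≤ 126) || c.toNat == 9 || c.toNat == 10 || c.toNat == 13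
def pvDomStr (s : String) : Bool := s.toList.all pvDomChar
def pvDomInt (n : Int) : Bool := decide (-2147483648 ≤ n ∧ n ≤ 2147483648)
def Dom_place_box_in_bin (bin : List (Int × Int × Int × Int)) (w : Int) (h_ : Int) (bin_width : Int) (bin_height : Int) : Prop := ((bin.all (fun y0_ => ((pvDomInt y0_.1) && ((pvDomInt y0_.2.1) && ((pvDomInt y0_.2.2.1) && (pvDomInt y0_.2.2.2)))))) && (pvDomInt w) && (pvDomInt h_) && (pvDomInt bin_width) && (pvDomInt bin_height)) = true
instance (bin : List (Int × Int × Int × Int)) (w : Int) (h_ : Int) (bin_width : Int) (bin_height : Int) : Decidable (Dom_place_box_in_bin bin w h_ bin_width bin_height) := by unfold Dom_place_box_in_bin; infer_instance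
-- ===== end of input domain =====

-- B tests only sorted candidate x/y breakpoints (0 or box edges) instead of every grid cell;
-- equivalence here is about the return value (both Pythons also append the same box when True).

-- the shared non-overlap test 'all(... for bin_x, bin_y, bin_w, bin_h in bin)'
def pvFree (bin : List (Int × Int × Int × Int)) (w : Int) (h_ : Int) (x : Int) (y : Int) : Bool :=
  bin.all (fun b => decide (x + w ≤ b.1) || decide (x ≥ b.1 + b.2.2.1) ||
                    decide (y + h_ ≤ b.2.1) || decide (y ≥ b.2.1 + b.2.2.2))

-- ===== PORT A =====
-- the inner 'for y in range(...)' with its early 'return True' (range is lazy in Python,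
-- so the loop is ported as a recursion, not a materialized list)
def pvLoopY (bin : List (Int × Int × Int × Int)) (w : Int) (h_ : Int) (x : Int) (y : Int) (yend : Int) : Bool :=
  if y < yend then
    if pvFree bin w h_ x y then true
    else pvLoopY bin w h_ x (y + 1) yend
  else false
termination_by (yend - y).toNat
decreasing_by omega

-- the outer 'for x in range(...)'
def pvLoopX (bin : List (Int × Int × Int × Int)) (w : Int) (h_ : Int) (x : Int) (xend : Int) (yend : Int) : Bool :=
  if x < xend then
    if pvLoopY bin w h_ x 0 yend then true
    else pvLoopX bin w h_ (x + 1) xend yend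
  else false
termination_by (xend - x).toNat
decreasing_by omega

def place_box_in_bin (bin : List (Int × Int × Int × Int)) (w : Int) (h_ : Int) (bin_width : Int) (bin_height : Int) : Bool :=
  pvLoopX bin w h_ 0 (bin_width - w + 1) (bin_height - h_ + 1)

-- ===== PORT B =====
def place_box_in_bin_alt (bin : List (Int × Int × Int × Int)) (w : Int) (h_ : Int) (bin_width : Int) (bin_height : Int) : Bool :=
  let xs := PySem.List.sorted (PySem.Set.ofList (0 :: bin.map (fun b => b.1 + b.2.2.1))) (fun v => v) false
  let ys := PySem.List.sorted (PySem.Set.ofList (0 :: bin.map (fun b => b.2.1 + b.2.2.2))) (fun v => v) false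
  xs.any (fun x =>
    !(decide (x < 0) || decide (x > bin_width - w)) &&
    ys.any (fun y =>
      !(decide (y < 0) || decide (y > bin_height - h_)) &&
      pvFree bin w h_ x y))

-- ===== PRECONDITION & SPEC =====
def Spec_place_box_in_bin (bin : List (Int × Int × Int × Int)) (w : Int) (h_ : Int) (bin_width : Int) (bin_height : Int) (out : Bool) : Prop := out = place_box_in_bin_alt bin w h_ bin_width bin_height
instance (bin : List (Int × Int × Int × Int)) (w : Int) (h_ : Int) (bin_width : Int) (bin_height : Int) (out : Bool) : Decidable (Spec_place_box_in_bin bin w h_ bin_width bin_height out) := by unfold Spec_place_box_in_bin; infer_instance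

-- ===== CLAIM (what is proved, stated in full; the proofs are below) =====
def Claim_equal_place_box_in_bin : Prop := ∀ (bin : List (Int × Int × Int × Int)) (w : Int) (h_ : Int) (bin_width : Int) (bin_height : Int), Dom_place_box_in_bin bin w h_ bin_width bin_height → Spec_place_box_in_bin bin w h_ bin_width bin_height (place_box_in_bin bin w h_ bin_width bin_height)

-- ===== LEMMAS AND PROOFS =====

-- Unfold pvFree to a ∀-statement
theorem pvFree_iff (bin : List (Int × Int × Int × Int)) (w h_ x y : Int) :
    pvFree bin w h_ x y = true ↔
    ∀ b ∈ bin, x + w ≤ b.1 ∨ x ≥ b.1 + b.2.2.1 ∨ y + h_ ≤ b.2.1 ∨ y ≥ b.2.1 + b.2.2.2 := by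
  simp [pvFree, List.all_eq_true]
  constructor <;> intro h a b c d hm <;> have := h a b c d hm <;> tauto

-- Sliding one step left keeps the position free unless x is a box's right edge
theorem pvFree_slide_x (bin : List (Int × Int × Int × Int)) (w h_ x y : Int)
    (h : pvFree bin w h_ x y = true) (hne : ∀ b ∈ bin, b.1 + b.2.2.1 ≠ x) :
    pvFree bin w h_ (x - 1) y = true := by
  rw [pvFree_iff] at h ⊢
  intro b hb
  have := h b hb
  have := hne b hb
  omega

theorem pvFree_slide_y (bin : List (Int × Int × Int × Int)) (w h_ x y : Int)
    (h : pvFree bin w h_ x y = true) (hne : ∀ b ∈ bin, b.2.1 + b.2.2.2 ≠ y) :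
    pvFree bin w h_ x (y - 1) = true := by
  rw [pvFree_iff] at h ⊢
  intro b hb
  have := h b hb
  have := hne b hb
  omega

-- any free (x, y) with 0 ≤ x admits a candidate x' ≤ x that is still free with the same y
theorem slide_to_cand_x (bin : List (Int × Int × Int × Int)) (w h_ : Int) :
    ∀ (n : Nat) (y : Int), pvFree bin w h_ (n : Int) y = true →
    ∃ x' : Int, 0 ≤ x' ∧ x' ≤ (n : Int) ∧
      (x' = 0 ∨ ∃ b ∈ bin, x' = b.1 + b.2.2.1) ∧ pvFree bin w h_ x' y = true := by
  intro n
  induction n with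
  | zero => intro y hf; exact ⟨0, le_refl 0, le_refl 0, Or.inl rfl, hf⟩
  | succ k ih =>
    intro y hf
    by_cases hc : ∃ b ∈ bin, b.1 + b.2.2.1 = ((k : Int) + 1)
    · obtain ⟨b, hb, hbe⟩ := hc
      refine ⟨(k : Int) + 1, by positivity, by push_cast; omega, Or.inr ⟨b, hb, hbe.symm⟩, by push_cast at hf ⊢; exact hf⟩
    · push Not at hc
      have hf' : pvFree bin w h_ (k : Int) y = true := by
        have := pvFree_slide_x bin w h_ ((k : Int) + 1) y (by push_cast at hf ⊢; exact hf) hc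
        simpa using this
      obtain ⟨x', h0, hle, hcand, hfr⟩ := ih y hf'
      exact ⟨x', h0, by push_cast; omega, hcand, hfr⟩

theorem slide_to_cand_y (bin : List (Int × Int × Int × Int)) (w h_ : Int) :
    ∀ (n : Nat) (x : Int), pvFree bin w h_ x (n : Int) = true →
    ∃ y' : Int, 0 ≤ y' ∧ y' ≤ (n : Int) ∧
      (y' = 0 ∨ ∃ b ∈ bin, y' = b.2.1 + b.2.2.2) ∧ pvFree bin w h_ x y' = true := by
  intro n
  induction n with
  | zero => intro x hf; exact ⟨0, le_refl 0, le_refl 0, Or.inl rfl, hf⟩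
  | succ k ih =>
    intro x hf
    by_cases hc : ∃ b ∈ bin, b.2.1 + b.2.2.2 = ((k : Int) + 1)
    · obtain ⟨b, hb, hbe⟩ := hc
      refine ⟨(k : Int) + 1, by positivity, by push_cast; omega, Or.inr ⟨b, hb, hbe.symm⟩, by push_cast at hf ⊢; exact hf⟩
    · push Not at hc
      have hf' : pvFree bin w h_ x (k : Int) = true := by
        have := pvFree_slide_y bin w h_ x ((k : Int) + 1) (by push_cast at hf ⊢; exact hf) hc
        simpa using this
      obtain ⟨y', h0, hle, hcand, hfr⟩ := ih x hf'
      exact ⟨y', h0, by push_cast; omega, hcand, hfr⟩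

theorem loopY_iff (bin : List (Int × Int × Int × Int)) (w h_ x : Int) :
    ∀ (y yend : Int), pvLoopY bin w h_ x y yend = true ↔
      ∃ y', y ≤ y' ∧ y' < yend ∧ pvFree bin w h_ x y' = true := by
  intro y yend
  fun_induction pvLoopY bin w h_ x y yend with
  | case1 y h hf =>
    simp only [true_iff]
    exact ⟨y, le_refl y, h, hf⟩
  | case2 y h hf ih =>
    rw [ih]
    constructor
    · rintro ⟨y', h1, h2, h3⟩; exact ⟨y', by omega, h2, h3⟩
    · rintro ⟨y', h1, h2, h3⟩
      refine ⟨y', ?_, h2, h3⟩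
      rcases eq_or_lt_of_le h1 with rfl | hlt
      · rw [h3] at hf; exact absurd rfl hf
      · omega
  | case3 y h =>
    simp only [Bool.false_eq_true, false_iff]
    rintro ⟨y', h1, h2, _⟩; omega

theorem loopX_iff (bin : List (Int × Int × Int × Int)) (w h_ : Int) :
    ∀ (x xend yend : Int), pvLoopX bin w h_ x xend yend = true ↔
      ∃ x', x ≤ x' ∧ x' < xend ∧ pvLoopY bin w h_ x' 0 yend = true := by
  intro x xend yend
  fun_induction pvLoopX bin w h_ x xend yend with
  | case1 x h hf =>
    simp only [true_iff]
    exact ⟨x, le_refl x, h, hf⟩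
  | case2 x h hf ih =>
    rw [ih]
    constructor
    · rintro ⟨x', h1, h2, h3⟩; exact ⟨x', by omega, h2, h3⟩
    · rintro ⟨x', h1, h2, h3⟩
      refine ⟨x', ?_, h2, h3⟩
      rcases eq_or_lt_of_le h1 with rfl | hlt
      · rw [h3] at hf; exact absurd rfl hf
      · omega
  | case3 x h =>
    simp only [Bool.false_eq_true, false_iff]
    rintro ⟨x', h1, h2, _⟩; omega

theorem A_iff (bin : List (Int × Int × Int × Int)) (w h_ W H : Int) :
    place_box_in_bin bin w h_ W H = true ↔
    ∃ x, (0 ≤ x ∧ x ≤ W - w) ∧ ∃ y, (0 ≤ y ∧ y ≤ H - h_) ∧ pvFree bin w h_ x y = true := by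
  unfold place_box_in_bin
  rw [loopX_iff]
  constructor
  · rintro ⟨x, hx0, hx1, hy⟩
    rw [loopY_iff] at hy
    obtain ⟨y, hy0, hy1, hf⟩ := hy
    exact ⟨x, ⟨hx0, by omega⟩, y, ⟨hy0, by omega⟩, hf⟩
  · rintro ⟨x, ⟨hx0, hx1⟩, y, ⟨hy0, hy1⟩, hf⟩
    exact ⟨x, hx0, by omega, (loopY_iff bin w h_ x 0 _).mpr ⟨y, hy0, by omega, hf⟩⟩

theorem B_iff (bin : List (Int × Int × Int × Int)) (w h_ W H : Int) :
    place_box_in_bin_alt bin w h_ W H = true ↔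
    ∃ x, (x = 0 ∨ ∃ b ∈ bin, x = b.1 + b.2.2.1) ∧ (0 ≤ x ∧ x ≤ W - w) ∧
      ∃ y, (y = 0 ∨ ∃ b ∈ bin, y = b.2.1 + b.2.2.2) ∧ (0 ≤ y ∧ y ≤ H - h_) ∧
        pvFree bin w h_ x y = true := by
  simp only [place_box_in_bin_alt, List.any_eq_true, PySem.List.mem_sorted, PySem.Set.mem_ofList,
    List.mem_cons, List.mem_map, Bool.and_eq_true, Bool.not_eq_true', Bool.or_eq_false_iff,
    decide_eq_false_iff_not, not_lt]
  constructor
  · rintro ⟨x, hxc, ⟨hx0, hx1⟩, y, hyc, ⟨hy0, hy1⟩, hf⟩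
    refine ⟨x, ?_, ⟨hx0, by omega⟩, y, ?_, ⟨hy0, by omega⟩, hf⟩
    · rcases hxc with h | ⟨b, hb, he⟩
      · exact Or.inl h
      · exact Or.inr ⟨b, hb, he.symm⟩
    · rcases hyc with h | ⟨b, hb, he⟩
      · exact Or.inl h
      · exact Or.inr ⟨b, hb, he.symm⟩
  · rintro ⟨x, hxc, ⟨hx0, hx1⟩, y, hyc, ⟨hy0, hy1⟩, hf⟩
    refine ⟨x, ?_, ⟨hx0, by omega⟩, y, ?_, ⟨hy0, by omega⟩, hf⟩
    · rcases hxc with h | ⟨b, hb, he⟩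
      · exact Or.inl h
      · exact Or.inr ⟨b, hb, he.symm⟩
    · rcases hyc with h | ⟨b, hb, he⟩
      · exact Or.inl h
      · exact Or.inr ⟨b, hb, he.symm⟩

-- ===== VERDICT (by name: the statement is the Claim_ definition above) =====
theorem place_box_in_bin_spec : Claim_equal_place_box_in_bin := by
  intro bin w h_ W H _
  unfold Spec_place_box_in_bin
  rcases hA : place_box_in_bin bin w h_ W H with _ | _
  · rcases hB : place_box_in_bin_alt bin w h_ W H with _ | _
    · rfl
    · exfalso
      rw [B_iff] at hB
      obtain ⟨x, _, hxb, y, _, hyb, hf⟩ := hB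
      have : place_box_in_bin bin w h_ W H = true :=
        (A_iff bin w h_ W H).mpr ⟨x, hxb, y, hyb, hf⟩
      rw [hA] at this; exact Bool.false_ne_true this
  · rw [A_iff] at hA
    obtain ⟨x, ⟨hx0, hx1⟩, y, ⟨hy0, hy1⟩, hf⟩ := hA
    -- slide x down to a candidate
    have hxe : ((x.toNat : Int)) = x := Int.toNat_of_nonneg hx0
    obtain ⟨x', hx'0, hx'le, hx'c, hf'⟩ :=
      slide_to_cand_x bin w h_ x.toNat y (by rw [hxe]; exact hf)
    rw [hxe] at hx'le
    have hye : ((y.toNat : Int)) = y := Int.toNat_of_nonneg hy0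
    obtain ⟨y', hy'0, hy'le, hy'c, hf''⟩ :=
      slide_to_cand_y bin w h_ y.toNat x' (by rw [hye]; exact hf')
    rw [hye] at hy'le
    symm
    rw [B_iff]
    exact ⟨x', hx'c, ⟨hx'0, by omega⟩, y', hy'c, ⟨hy'0, by omega⟩, hf''⟩
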